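-- pv_equiv track=rewrite | github.com/InfiniteLoop360/GFG_POTD | Modify the Array.py | modifyAndRearrangeArr
-- ===== SOURCE A (Python) =====
-- def modifyAndRearrangeArr(arr):
--     n = len(arr)
--
--     # Step 1: Modify the array by doubling the current element if next is equal and non-zero
--     for i in range(n - 1):
--         if arr[i] == arr[i + 1] and arr[i] != 0:
--             arr[i] *= 2
--             arr[i + 1] = 0
--
--     # Step 2: Shift non-zero elements to the front and fill the rest with 0's
--     non_zero_pos = 0
--
--     # Place all non-zero elements in the beginning of the array
--     for i in range(n):
--         if arr[i] != 0:
--             arr[non_zero_pos] = arr[i]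
--             non_zero_pos += 1
--
--     # Fill the remaining positions with 0's
--     while non_zero_pos < n:
--         arr[non_zero_pos] = 0
--         non_zero_pos += 1
--
--     return arr
-- ===== SOURCE B (Python) =====
-- def modifyAndRearrangeArr(arr):
--     n = len(arr)
--     out = []
--     i = 0
--     while i < n:
--         if i + 1 < n and arr[i] == arr[i + 1] and arr[i] != 0:
--             out.append(2 * arr[i])
--             i += 2
--         else:
--             if arr[i] != 0:
--                 out.append(arr[i])
--             i += 1
--     out += [0] * (n - len(out))
--     arr[:] = out
--     return arr
-- ===== Notes on version B (the rewrite author's own statement) =====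
-- stated objective: alternative
-- what changed: Replaces A's three in-place passes (merge adjacent equal pairs, compact nonzeros by index shifting, zero-fill tail) with a single forward scan that builds the output list directly, advancing by 2 on a merge, then pads with zeros and slice-assigns back.
import Mathlib
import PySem

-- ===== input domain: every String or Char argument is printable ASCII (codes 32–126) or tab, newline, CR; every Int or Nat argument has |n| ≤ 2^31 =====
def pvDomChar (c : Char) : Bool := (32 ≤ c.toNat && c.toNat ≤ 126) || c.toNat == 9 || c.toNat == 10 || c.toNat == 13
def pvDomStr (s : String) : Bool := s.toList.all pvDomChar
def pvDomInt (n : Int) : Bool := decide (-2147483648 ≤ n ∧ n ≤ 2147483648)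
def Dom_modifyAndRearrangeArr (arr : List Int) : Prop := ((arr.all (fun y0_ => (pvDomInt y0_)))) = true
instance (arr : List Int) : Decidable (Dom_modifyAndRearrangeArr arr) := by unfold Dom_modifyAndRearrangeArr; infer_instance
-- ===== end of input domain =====

-- B builds the result in one forward scan instead of A's three in-place passes; both Pythons
-- mutate arr in place (B via arr[:] = out), and the theorem is about the returned value.

-- ===== PORT A =====
-- body of A's first loop: if arr[i]==arr[i+1] and arr[i]!=0: arr[i]*=2; arr[i+1]=0
def pvBody1 (l : List Int) (i : Nat) : List Int :=
  if l.getD i 0 = l.getD (i+1) 0 ∧ l.getD i 0 ≠ 0 then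
    (l.set i (2 * l.getD i 0)).set (i+1) 0
  else l

-- body of A's second loop over (arr, non_zero_pos)
def pvBody2 (s : List Int × Nat) (i : Nat) : List Int × Nat :=
  if s.1.getD i 0 ≠ 0 then (s.1.set s.2 (s.1.getD i 0), s.2 + 1) else s

-- A's trailing while loop filling zeros
def pvFill (l : List Int) (pos n : Nat) : List Int :=
  if pos < n then pvFill (l.set pos 0) (pos+1) n else l
termination_by n - pos

def modifyAndRearrangeArr (arr : List Int) : List Int :=
  let n := arr.length
  let a1 := (List.range (n - 1)).foldl pvBody1 arr
  let s := (List.range n).foldl pvBody2 (a1, 0)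
  pvFill s.1 s.2 n

-- ===== PORT B =====
-- B's single scan with index i: merge-and-skip-2, else keep nonzero; structural recursion
-- mirrors the 'i+1 < n' / 'i < n' index tests.
def pvScanB : List Int → List Int
  | [] => []
  | [a] => if a ≠ 0 then [a] else []
  | a :: b :: rest =>
    if a = b ∧ a ≠ 0 then 2 * a :: pvScanB rest
    else if a ≠ 0 then a :: pvScanB (b :: rest) else pvScanB (b :: rest)

def modifyAndRearrangeArr_alt (arr : List Int) : List Int :=
  let out := pvScanB arr
  out ++ List.replicate (arr.length - out.length) 0

-- ===== PRECONDITION & SPEC =====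
def Spec_modifyAndRearrangeArr (arr : List Int) (out : List Int) : Prop := out = modifyAndRearrangeArr_alt arr
instance (arr : List Int) (out : List Int) : Decidable (Spec_modifyAndRearrangeArr arr out) := by unfold Spec_modifyAndRearrangeArr; infer_instance

-- ===== CLAIM (what is proved, stated in full; the proofs are below) =====
def Claim_equal_modifyAndRearrangeArr : Prop := ∀ (arr : List Int), Dom_modifyAndRearrangeArr arr → Spec_modifyAndRearrangeArr arr (modifyAndRearrangeArr arr)

-- ===== LEMMAS AND PROOFS =====

-- result of A's first pass, characterised structurally
def pvM : List Int → List Int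
  | [] => []
  | [a] => [a]
  | a :: b :: rest =>
    if a = b ∧ a ≠ 0 then 2 * a :: 0 :: pvM rest else a :: pvM (b :: rest)

theorem pvM_length (l : List Int) : (pvM l).length = l.length := by
  induction l using pvM.induct with
  | case1 => simp [pvM]
  | case2 => simp [pvM]
  | case3 a b rest h ih =>
    obtain ⟨hab, ha⟩ := h; subst hab; simp [pvM, ha, ih]
  | case4 a b rest h ih => simp [pvM, h, ih]

theorem scanB_filter (l : List Int) :
    pvScanB l = (pvM l).filter (fun x => decide (x ≠ 0)) := by
  induction l using pvM.induct with
  | case1 => simp [pvM, pvScanB]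
  | case2 a => by_cases h : a = 0 <;> simp [pvM, pvScanB, h]
  | case3 a b rest h ih =>
    obtain ⟨hab, ha⟩ := h; subst hab
    have h2 : (2:Int) * a ≠ 0 := by omega
    simp [pvM, pvScanB, ha, h2, ih]
  | case4 a b rest h ih =>
    by_cases ha : a = 0
    · simp [pvM, pvScanB, h, ha, ih]
    · have hab : a ≠ b := fun he => h ⟨he, ha⟩
      simp [pvM, pvScanB, h, ha, hab, ih]

theorem getD_append_len (pre l : List Int) (j : Nat) :
    (pre ++ l).getD (pre.length + j) 0 = l.getD j 0 := by
  rw [List.getD_append_right _ _ _ _ (by omega)]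
  simp

theorem set_append_len (pre l : List Int) (j : Nat) (v : Int) :
    (pre ++ l).set (pre.length + j) v = pre ++ l.set j v := by
  rw [List.set_append]
  simp

theorem merge_fold (l : List Int) : ∀ (pre : List Int),
    (List.range' pre.length (l.length - 1)).foldl pvBody1 (pre ++ l) = pre ++ pvM l := by
  induction l using pvM.induct with
  | case1 => intro pre; simp [pvM]
  | case2 a => intro pre; simp [pvM]
  | case3 a b rest h ih =>
    obtain ⟨hab, ha⟩ := h
    subst hab
    intro pre
    have hga : (pre ++ a :: a :: rest).getD pre.length 0 = a := by
      have := getD_append_len pre (a :: a :: rest) 0; simpa using this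
    have hgb : (pre ++ a :: a :: rest).getD (pre.length + 1) 0 = a := by
      have := getD_append_len pre (a :: a :: rest) 1; simpa using this
    have hlen : (a :: a :: rest).length - 1 = rest.length + 1 := by simp
    rw [hlen, List.range'_succ, List.foldl_cons]
    have hbody : pvBody1 (pre ++ a :: a :: rest) pre.length
        = (pre ++ [2*a, 0]) ++ rest := by
      unfold pvBody1
      rw [hga, hgb, if_pos ⟨rfl, ha⟩]
      have h1 : (pre ++ a :: a :: rest).set pre.length (2*a) = pre ++ 2*a :: a :: rest := by
        have := set_append_len pre (a :: a :: rest) 0 (2*a); simpa using this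
      rw [h1]
      have h2 : (pre ++ 2*a :: a :: rest).set (pre.length + 1) 0 = pre ++ 2*a :: 0 :: rest := by
        have := set_append_len pre (2*a :: a :: rest) 1 0; simpa using this
      rw [h2]; simp
    rw [hbody]
    cases rest with
    | nil => simp [pvM, ha]
    | cons r rest' =>
      have hlen2 : (r :: rest').length = rest'.length + 1 := by simp
      rw [hlen2, List.range'_succ, List.foldl_cons]
      have hg0 : ((pre ++ [2*a, 0]) ++ r :: rest').getD (pre.length + 1) 0 = 0 := by
        have h4 : (pre ++ [2*a, 0]) ++ r :: rest' = (pre ++ [2*a]) ++ (0 :: r :: rest') := by simp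
        have h3 : pre.length + 1 = (pre ++ [2*a]).length := by simp
        rw [h4, h3]
        have := getD_append_len (pre ++ [2*a]) (0 :: r :: rest') 0
        simpa using this
      have hbody2 : pvBody1 ((pre ++ [2*a, 0]) ++ r :: rest') (pre.length + 1)
          = (pre ++ [2*a, 0]) ++ r :: rest' := by
        unfold pvBody1
        rw [hg0]; simp
      rw [hbody2]
      have hpl : pre.length + 1 + 1 = (pre ++ [2*a, 0]).length := by simp
      have hcnt : rest'.length = (r :: rest').length - 1 := by simp
      rw [hpl, hcnt, ih (pre ++ [2*a, 0])]
      simp [pvM, ha]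
  | case4 a b rest h ih =>
    intro pre
    have hga : (pre ++ a :: b :: rest).getD pre.length 0 = a := by
      have := getD_append_len pre (a :: b :: rest) 0; simpa using this
    have hgb : (pre ++ a :: b :: rest).getD (pre.length + 1) 0 = b := by
      have := getD_append_len pre (a :: b :: rest) 1; simpa using this
    have hlen : (a :: b :: rest).length - 1 = rest.length + 1 := by simp
    rw [hlen, List.range'_succ, List.foldl_cons]
    have hbody : pvBody1 (pre ++ a :: b :: rest) pre.length = pre ++ a :: b :: rest := by
      unfold pvBody1
      rw [hga, hgb, if_neg h]
    rw [hbody]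
    have h4 : pre ++ a :: b :: rest = (pre ++ [a]) ++ b :: rest := by simp
    have hpl : pre.length + 1 = (pre ++ [a]).length := by simp
    have hcnt : rest.length = (b :: rest).length - 1 := by simp
    rw [h4, hpl, hcnt, ih (pre ++ [a])]
    simp [pvM, h]

theorem fill_spec (R : List Int) : ∀ (F : List Int) (n : Nat), F.length + R.length = n →
    pvFill (F ++ R) F.length n = F ++ List.replicate R.length 0 := by
  induction R with
  | nil =>
    intro F n h
    rw [pvFill]
    simp at h
    simp [h]
  | cons r R' ih =>
    intro F n h
    rw [pvFill]
    rw [if_pos (by simp at h ⊢; omega)]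
    have h1 : (F ++ r :: R').set F.length 0 = (F ++ [0]) ++ R' := by
      have := set_append_len F (r :: R') 0 0; simpa using this
    have h2 : F.length + 1 = (F ++ [0]).length := by simp
    rw [h1, h2, ih (F ++ [0]) n (by simp at h ⊢; omega)]
    simp [List.replicate_succ]

theorem compact_fold (L : List Int) : ∀ (m i : Nat), m = L.length - i → i ≤ L.length →
    (List.range' i m).foldl pvBody2
      (((L.take i).filter (fun x => decide (x ≠ 0))) ++ L.drop ((L.take i).filter (fun x => decide (x ≠ 0))).length,
       ((L.take i).filter (fun x => decide (x ≠ 0))).length)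
    = ((L.filter (fun x => decide (x ≠ 0))) ++ L.drop (L.filter (fun x => decide (x ≠ 0))).length,
       (L.filter (fun x => decide (x ≠ 0))).length) := by
  intro m
  induction m with
  | zero =>
    intro i hm hi
    have : i = L.length := by omega
    subst this
    simp
  | succ m' ih =>
    intro i hm hi
    have hilt : i < L.length := by omega
    set F := (L.take i).filter (fun x => decide (x ≠ 0)) with hF
    have hple : F.length ≤ i := by
      calc F.length ≤ (L.take i).length := List.length_filter_le _ _
        _ = i := by rw [List.length_take]; omega
    have hgetv : (F ++ L.drop F.length).getD i 0 = L.getD i 0 := by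
      rw [List.getD_append_right _ _ _ _ (by omega)]
      have : F.length + (i - F.length) = i := by omega
      simp [List.getD, List.getElem?_drop, this]
    have htake1 : L.take (i+1) = L.take i ++ [L.getD i 0] := by
      rw [List.take_add_one]
      simp [List.getD, List.getElem?_eq_getElem hilt]
    rw [List.range'_succ, List.foldl_cons]
    by_cases hv : L.getD i 0 ≠ 0
    · have hbody : pvBody2 (F ++ L.drop F.length, F.length) i
          = ((F ++ [L.getD i 0]) ++ L.drop (F.length + 1), F.length + 1) := by
        unfold pvBody2
        simp only [hgetv]
        rw [if_pos hv]
        have hdrop : L.drop F.length = L.getD F.length 0 :: L.drop (F.length + 1) := by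
          rw [List.drop_eq_getElem_cons (by omega)]
          simp [List.getD, List.getElem?_eq_getElem (show F.length < L.length by omega)]
        have hset := set_append_len F (L.drop F.length) 0 (L.getD i 0)
        simp only [Nat.add_zero] at hset
        rw [hset, hdrop]
        simp
      rw [hbody]
      have hF1 : (L.take (i+1)).filter (fun x => decide (x ≠ 0)) = F ++ [L.getD i 0] := by
        rw [htake1, List.filter_append, hF]
        have hv' : ¬ L[i]?.getD 0 = 0 := by simpa [List.getD] using hv
        simp [hv']
      have hrec := ih (i+1) (by omega) (by omega)
      rw [hF1] at hrec
      simpa using hrec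
    · have hv0 : L.getD i 0 = 0 := by simpa using hv
      have hbody : pvBody2 (F ++ L.drop F.length, F.length) i = (F ++ L.drop F.length, F.length) := by
        unfold pvBody2
        simp only [hgetv]
        rw [if_neg hv]
      rw [hbody]
      have hF1 : (L.take (i+1)).filter (fun x => decide (x ≠ 0)) = F := by
        rw [htake1, List.filter_append, hF]
        have hv0' : L[i]?.getD 0 = 0 := by simpa [List.getD] using hv0
        simp [hv0']
      have hrec := ih (i+1) (by omega) (by omega)
      rw [hF1] at hrec
      exact hrec



-- ===== VERDICT (by name: the statement is the Claim_ definition above) =====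
theorem modifyAndRearrangeArr_spec : Claim_equal_modifyAndRearrangeArr := by
  intro arr _
  unfold Spec_modifyAndRearrangeArr modifyAndRearrangeArr modifyAndRearrangeArr_alt
  have h1 : (List.range (arr.length - 1)).foldl pvBody1 arr = pvM arr := by
    have := merge_fold arr []
    simpa [List.range_eq_range'] using this
  have h2 : (List.range arr.length).foldl pvBody2 (pvM arr, 0)
      = (((pvM arr).filter (fun x => decide (x ≠ 0))) ++ (pvM arr).drop ((pvM arr).filter (fun x => decide (x ≠ 0))).length,
         ((pvM arr).filter (fun x => decide (x ≠ 0))).length) := by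
    have := compact_fold (pvM arr) ((pvM arr).length) 0 (by omega) (by omega)
    simpa [List.range_eq_range', pvM_length] using this
  have hfle : ((pvM arr).filter (fun x => decide (x ≠ 0))).length ≤ arr.length := by
    calc ((pvM arr).filter (fun x => decide (x ≠ 0))).length ≤ (pvM arr).length := List.length_filter_le _ _
      _ = arr.length := pvM_length arr
  have h3 := fill_spec ((pvM arr).drop ((pvM arr).filter (fun x => decide (x ≠ 0))).length)
      ((pvM arr).filter (fun x => decide (x ≠ 0))) arr.length
      (by rw [List.length_drop, pvM_length]; omega)
  simp only [h1, h2, h3]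
  rw [scanB_filter]
  rw [List.length_drop, pvM_length]
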